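-- pv_equiv track=rewrite | github.com/PIWEEK/comocomo | comocomo-back/comocomo/management/commands/load_types.py | _energy_beverage
-- ===== SOURCE A (Python) =====
-- def _energy_beverage(value):
--     REFERENCE = {
--         0: 0,
--         30: 1,
--         60: 2,
--         90: 3,
--         120: 4,
--         150: 5,
--         180: 6,
--         210: 7,
--         240: 8,
--         270: 9
--     }
--
--     try:
--         return next(v for (k,v) in REFERENCE.items() if value <= k)
--     except:
--         return 10 # > 270
-- ===== SOURCE B (Python) =====
-- def _energy_beverage(value):
--     # closed-form bucket: ceil(value/30) clamped to [0, 10]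
--     return max(0, min(10, -(-value // 30)))
-- ===== Notes on version B (the rewrite author's own statement) =====
-- stated objective: simpler
-- what changed: Replaces the dict scan for the first threshold with a closed-form ceil(value/30) clamped to [0,10].
import Mathlib
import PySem

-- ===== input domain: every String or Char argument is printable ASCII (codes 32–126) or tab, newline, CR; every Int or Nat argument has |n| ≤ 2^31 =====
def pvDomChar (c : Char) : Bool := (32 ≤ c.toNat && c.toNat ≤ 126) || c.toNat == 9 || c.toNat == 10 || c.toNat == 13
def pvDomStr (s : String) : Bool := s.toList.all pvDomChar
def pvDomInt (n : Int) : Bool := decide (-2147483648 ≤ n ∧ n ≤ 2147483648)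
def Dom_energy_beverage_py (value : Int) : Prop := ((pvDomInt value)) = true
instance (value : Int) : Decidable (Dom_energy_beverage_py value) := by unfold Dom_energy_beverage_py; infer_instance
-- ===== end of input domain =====

-- B replaces A's scan of the 10-entry threshold dict with a closed-form clamped ceiling division (objective: simpler).

-- ===== PORT A =====
-- the generator `next(v for (k,v) in REFERENCE.items() if value <= k)`: first matching value,
-- the bare except catches the StopIteration and returns 10
def energy_beverage_py (value : Int) : Int :=
  let REFERENCE : List (Int × Int) :=
    [(0,0),(30,1),(60,2),(90,3),(120,4),(150,5),(180,6),(210,7),(240,8),(270,9)]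
  match REFERENCE.find? (fun kv => decide (value ≤ kv.1)) with
  | some kv => kv.2
  | none => 10

-- ===== PORT B =====
def energy_beverage_py_alt (value : Int) : Int :=
  max 0 (min 10 (-(PySem.Int.floordiv (-value) 30)))

-- ===== PRECONDITION & SPEC =====
def Spec_energy_beverage_py (value : Int) (out : Int) : Prop := out = energy_beverage_py_alt value
instance (value : Int) (out : Int) : Decidable (Spec_energy_beverage_py value out) := by unfold Spec_energy_beverage_py; infer_instance

-- ===== CLAIM (what is proved, stated in full; the proofs are below) =====
def Claim_equal_energy_beverage_py : Prop := ∀ (value : Int), Dom_energy_beverage_py value → Spec_energy_beverage_py value (energy_beverage_py value)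

-- ===== LEMMAS AND PROOFS =====
-- ===== VERDICT (by name: the statement is the Claim_ definition above) =====
theorem energy_beverage_py_spec : Claim_equal_energy_beverage_py := by
  intro value _
  unfold Spec_energy_beverage_py energy_beverage_py energy_beverage_py_alt
  have hb := (PySem.Int.neg_floordiv_neg_eq_iff_of_pos (a := value) (b := 30)
      (q := -(PySem.Int.floordiv (-value) 30)) (by norm_num)).mp rfl
  rw [PySem.Int.floordiv_eq_ediv_of_pos (by norm_num)] at hb ⊢
  simp only [List.find?]
  by_cases h0 : value ≤ (0:Int)
  · simp only [*, decide_true, decide_false, decide_eq_true_eq]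
    omega
  simp only [h0, decide_false]
  by_cases h30 : value ≤ (30:Int)
  · simp only [*, decide_true, decide_false, decide_eq_true_eq]
    omega
  simp only [h30, decide_false]
  by_cases h60 : value ≤ (60:Int)
  · simp only [*, decide_true, decide_false, decide_eq_true_eq]
    omega
  simp only [h60, decide_false]
  by_cases h90 : value ≤ (90:Int)
  · simp only [*, decide_true, decide_false, decide_eq_true_eq]
    omega
  simp only [h90, decide_false]
  by_cases h120 : value ≤ (120:Int)
  · simp only [*, decide_true, decide_false, decide_eq_true_eq]
    omega
  simp only [h120, decide_false]
  by_cases h150 : value ≤ (150:Int)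
  · simp only [*, decide_true, decide_false, decide_eq_true_eq]
    omega
  simp only [h150, decide_false]
  by_cases h180 : value ≤ (180:Int)
  · simp only [*, decide_true, decide_false, decide_eq_true_eq]
    omega
  simp only [h180, decide_false]
  by_cases h210 : value ≤ (210:Int)
  · simp only [*, decide_true, decide_false, decide_eq_true_eq]
    omega
  simp only [h210, decide_false]
  by_cases h240 : value ≤ (240:Int)
  · simp only [*, decide_true, decide_false, decide_eq_true_eq]
    omega
  simp only [h240, decide_false]
  by_cases h270 : value ≤ (270:Int)
  · simp only [*, decide_true, decide_false, decide_eq_true_eq]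
    omega
  simp only [h270, decide_false]
  omega
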